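-- pv_equiv track=rewrite | github.com/ihmeuw-msca/OneMod | src/onemod/stage/model_stages/spxmod_stage.py | _add_spline_variables
-- ===== SOURCE A (Python) =====
-- def _add_spline_variables(
--     xmodel_args: dict, spline_vars: list[str]
-- ) -> dict:
--     """Add spline variables to spxmod model configuration."""
--     for var in xmodel_args["variables"].copy():
--         if var["name"] == "spline":
--             xmodel_args["variables"].remove(var)
--             for spline_var in spline_vars:
--                 spline_variable = var.copy()
--                 spline_variable["name"] = spline_var
--                 xmodel_args["variables"].append(spline_variable)
--     return xmodel_args
-- ===== SOURCE B (Python) =====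
-- def _add_spline_variables(xmodel_args, spline_vars):
--     """Add spline variables to spxmod model configuration."""
--     variables = xmodel_args["variables"]
--     kept = [var for var in variables if var["name"] != "spline"]
--     splines = [var for var in variables if var["name"] == "spline"]
--     expanded = [{**var, "name": spline_var} for var in splines for spline_var in spline_vars]
--     xmodel_args["variables"] = kept + expanded
--     return xmodel_args
-- ===== Notes on version B (the rewrite author's own statement) =====
-- stated objective: simpler
-- what changed: Replaces A's in-place loop that remove()s each spline entry from the live list (a linear scan per removal) and appends expansions one by one with a single-pass partition into kept non-spline entries and a spline-expansion comprehension, concatenated once.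
import Mathlib
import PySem

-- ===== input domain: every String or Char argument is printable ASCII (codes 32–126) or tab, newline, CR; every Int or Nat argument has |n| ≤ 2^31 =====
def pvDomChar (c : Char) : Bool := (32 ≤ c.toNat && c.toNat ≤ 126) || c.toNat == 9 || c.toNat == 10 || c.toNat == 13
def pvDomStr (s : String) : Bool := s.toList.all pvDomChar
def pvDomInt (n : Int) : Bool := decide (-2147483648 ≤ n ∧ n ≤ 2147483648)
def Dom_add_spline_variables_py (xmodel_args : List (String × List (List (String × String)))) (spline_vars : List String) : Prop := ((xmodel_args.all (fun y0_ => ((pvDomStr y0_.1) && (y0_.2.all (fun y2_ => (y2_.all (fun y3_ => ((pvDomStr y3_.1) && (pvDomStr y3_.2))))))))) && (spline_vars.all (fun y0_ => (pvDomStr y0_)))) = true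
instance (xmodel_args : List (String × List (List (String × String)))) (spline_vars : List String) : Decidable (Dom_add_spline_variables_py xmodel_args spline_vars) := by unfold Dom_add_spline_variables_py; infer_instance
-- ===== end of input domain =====

-- B replaces A's in-place remove/append mutation loop by a one-pass partition (kept non-spline
-- entries ++ all spline expansions); equivalence is about the RETURN value — A mutates the inner
-- list object in place while B rebinds the "variables" entry to a fresh list.

-- ===== PORT A =====

-- Python dict equality (used by list.remove): same keys, same values.  Exact for dicts whose
-- assoc-list representation has no duplicate keys (guaranteed by Pre_); written symmetrically.
def pyDictEq (d1 d2 : List (String × String)) : Bool :=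
  d1.all (fun kv => List.lookup kv.1 d1 == List.lookup kv.1 d2) &&
  d2.all (fun kv => List.lookup kv.1 d1 == List.lookup kv.1 d2)

-- list.remove(v): drop the first element satisfying p.  Python raises ValueError when no element
-- matches; that situation is unreachable in A's loop (the removed var came from a copy of the list),
-- so the not-found branch returns the list unchanged.
def pyRemoveFirst {α : Type} (p : α → Bool) : List α → List α
  | [] => []
  | x :: xs => if p x then xs else x :: pyRemoveFirst p xs

-- d[k] = v on a dict: overwrite in place (position kept) if the key exists, else append.
def pySetKey {β : Type} (d : List (String × β)) (k : String) (v : β) : List (String × β) :=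
  if d.any (fun kv => kv.1 == k) then d.map (fun kv => if kv.1 == k then (k, v) else kv)
  else d ++ [(k, v)]

def add_spline_variables_py (xmodel_args : List (String × List (List (String × String)))) (spline_vars : List String) : List (String × List (List (String × String))) :=
  match List.lookup "variables" xmodel_args with
  | none => []  -- Python raises KeyError here; outside Pre_
  | some vars0 =>
      -- for var in xmodel_args["variables"].copy(): …  (live list as fold state)
      let final := vars0.foldl (fun live var =>
        if List.lookup "name" var == some "spline" then
          spline_vars.foldl (fun l s => l ++ [pySetKey var "name" s])
            (pyRemoveFirst (fun y => pyDictEq y var) live)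
        else live) vars0
      pySetKey xmodel_args "variables" final

-- ===== PORT B =====
def add_spline_variables_py_alt (xmodel_args : List (String × List (List (String × String)))) (spline_vars : List String) : List (String × List (List (String × String))) :=
  match List.lookup "variables" xmodel_args with
  | none => []  -- Python raises KeyError here; outside Pre_
  | some vars =>
      let kept := vars.filter (fun v => !(List.lookup "name" v == some "spline"))
      let splines := vars.filter (fun v => List.lookup "name" v == some "spline")
      let expanded := splines.flatMap (fun v => spline_vars.map (fun s => pySetKey v "name" s))
      pySetKey xmodel_args "variables" (kept ++ expanded)

-- ===== PRECONDITION & SPEC =====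
-- Pre_ excludes the inputs where A raises KeyError (no "variables" key, or a variable dict without
-- "name"), and assoc lists with duplicate keys, whose Python-dict image is ambiguous (a real Python
-- dict cannot hold duplicate keys; first-vs-last binding is anybody's choice).
def Pre_add_spline_variables_py (xmodel_args : List (String × List (List (String × String)))) (_spline_vars : List String) : Prop :=
  (List.lookup "variables" xmodel_args).isSome
  ∧ (xmodel_args.map Prod.fst).Nodup
  ∧ ∀ v ∈ (List.lookup "variables" xmodel_args).getD [],
      (List.lookup "name" v).isSome ∧ (v.map Prod.fst).Nodup
instance (xmodel_args : List (String × List (List (String × String)))) (spline_vars : List String) : Decidable (Pre_add_spline_variables_py xmodel_args spline_vars) := by unfold Pre_add_spline_variables_py; infer_instance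

def pvWitness_add_spline_variables_py : (List (String × List (List (String × String)))) × List String :=
  ([("variables", [[("name", "spline"), ("lam", "1")], [("name", "age"), ("lam", "2")]])], ["x", "y"])

def Spec_add_spline_variables_py (xmodel_args : List (String × List (List (String × String)))) (spline_vars : List String) (out : List (String × List (List (String × String)))) : Prop := out = add_spline_variables_py_alt xmodel_args spline_vars
instance (xmodel_args : List (String × List (List (String × String)))) (spline_vars : List String) (out : List (String × List (List (String × String)))) : Decidable (Spec_add_spline_variables_py xmodel_args spline_vars out) := by unfold Spec_add_spline_variables_py; infer_instance

-- ===== CLAIM (what is proved, stated in full; the proofs are below) =====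
def Claim_equal_add_spline_variables_py : Prop := ∀ (xmodel_args : List (String × List (List (String × String)))) (spline_vars : List String), Dom_add_spline_variables_py xmodel_args spline_vars → Pre_add_spline_variables_py xmodel_args spline_vars → Spec_add_spline_variables_py xmodel_args spline_vars (add_spline_variables_py xmodel_args spline_vars)

-- ===== LEMMAS AND PROOFS =====

theorem lookup_mem_str {β : Type} {k : String} {v : β} :
    ∀ {d : List (String × β)}, List.lookup k d = some v → (k, v) ∈ d := by
  intro d h
  induction d with
  | nil => simp at h
  | cons a t ih =>
      obtain ⟨k', v'⟩ := a
      simp only [List.lookup] at h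
      cases hk : (k == k') with
      | false =>
          rw [hk] at h
          simp only [] at h
          exact List.mem_cons_of_mem _ (ih h)
      | true =>
          rw [hk] at h
          simp at h
          have hke := beq_iff_eq.1 hk
          subst hke
          subst h
          simp

theorem pyDictEq_refl (d : List (String × String)) : pyDictEq d d = true := by
  simp [pyDictEq]

-- A non-spline entry is never dict-equal to a spline entry, so list.remove skips it.
theorem pyDictEq_false_of_name_ne (y v : List (String × String))
    (hy : (List.lookup "name" y == some "spline") = false)
    (hv : (List.lookup "name" v == some "spline") = true) :
    pyDictEq y v = false := by
  by_contra h
  rw [Bool.not_eq_false, pyDictEq, Bool.and_eq_true, List.all_eq_true, List.all_eq_true] at h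
  rw [beq_iff_eq] at hv
  have hmem : ("name", "spline") ∈ v := lookup_mem_str hv
  have := h.2 _ hmem
  simp only [beq_iff_eq] at this hy
  rw [this, hv] at hy
  simp at hy

theorem pyRemoveFirst_middle {α : Type} (p : α → Bool) (l1 l2 : List α) (x : α)
    (h1 : ∀ y ∈ l1, p y = false) (hx : p x = true) :
    pyRemoveFirst p (l1 ++ x :: l2) = l1 ++ l2 := by
  induction l1 with
  | nil => simp only [List.nil_append]; simp [pyRemoveFirst, hx]
  | cons a t ih =>
      have ha := h1 a (by simp)
      simp only [List.cons_append, pyRemoveFirst, ha]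
      exact congrArg (List.cons a) (ih (fun y hy => h1 y (by simp [hy])))

-- Loop invariant for A: having processed the prefix (its non-spline entries are 'kept', its
-- expansions are 'accexp'), processing the suffix yields kept non-spline entries followed by
-- all expansions, in order.
theorem aslv_loop (spline_vars : List String)
    (suf kept accexp : List (List (String × String)))
    (hk : ∀ y ∈ kept, (List.lookup "name" y == some "spline") = false) :
    List.foldl (fun live var =>
        if List.lookup "name" var == some "spline" then
          spline_vars.foldl (fun l s => l ++ [pySetKey var "name" s])
            (pyRemoveFirst (fun y => pyDictEq y var) live)
        else live) (kept ++ suf ++ accexp) suf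
      = kept ++ suf.filter (fun v => !(List.lookup "name" v == some "spline"))
          ++ (accexp ++ (suf.filter (fun v => List.lookup "name" v == some "spline")).flatMap
                (fun v => spline_vars.map (fun s => pySetKey v "name" s))) := by
  induction suf generalizing kept accexp with
  | nil => simp
  | cons var suf' ih =>
      rw [List.foldl_cons]
      by_cases h : (List.lookup "name" var == some "spline") = true
      · rw [if_pos h]
        have hrm : pyRemoveFirst (fun y => pyDictEq y var) (kept ++ (var :: suf') ++ accexp)
            = kept ++ (suf' ++ accexp) := by
          have : kept ++ (var :: suf') ++ accexp = kept ++ var :: (suf' ++ accexp) := by simp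
          rw [this]
          exact pyRemoveFirst_middle _ kept (suf' ++ accexp) var
            (fun y hy => pyDictEq_false_of_name_ne y var (hk y hy) h) (pyDictEq_refl var)
        rw [hrm, PySem.List.foldl_append_singleton_eq_map]
        have harr : kept ++ (suf' ++ accexp) ++ spline_vars.map (fun s => pySetKey var "name" s)
            = kept ++ suf' ++ (accexp ++ spline_vars.map (fun s => pySetKey var "name" s)) := by
          simp
        rw [harr, ih kept _ hk]
        simp [h]
      · rw [if_neg h]
        have hb : (List.lookup "name" var == some "spline") = false := by
          simpa using h
        have : kept ++ (var :: suf') ++ accexp = (kept ++ [var]) ++ suf' ++ accexp := by simp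
        rw [this, ih (kept ++ [var]) accexp
          (by intro y hy; rcases List.mem_append.1 hy with hy | hy
              · exact hk y hy
              · simp at hy; subst hy; exact hb)]
        simp [hb]

-- ===== VERDICT (by name: the statement is the Claim_ definition above) =====
theorem add_spline_variables_py_spec : Claim_equal_add_spline_variables_py := by
  intro xmodel_args spline_vars _dom _pre
  unfold Spec_add_spline_variables_py add_spline_variables_py add_spline_variables_py_alt
  cases h : List.lookup "variables" xmodel_args with
  | none => rfl
  | some vars0 =>
      simp only []
      congr 1
      have := aslv_loop spline_vars vars0 [] [] (by intro y hy; simp at hy)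
      simpa using this
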